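-- pv_equiv track=rewrite | github.com/chrisgs1311/aurum-signals | aurum_signal.py | _swing_lows_ohlc
-- ===== SOURCE A (Python) =====
-- def _swing_lows_ohlc(candles, n=3):
--     lows = []
--     for i in range(n, len(candles)-n):
--         lo = candles[i]["l"]
--         if all(lo <= candles[i-j]["l"] for j in range(1,n+1)) and \
--            all(lo <= candles[i+j]["l"] for j in range(1,n+1)):
--             lows.append((i, lo))
--     return lows
-- ===== SOURCE B (Python) =====
-- def _swing_lows_ohlc(candles, n=3):
--     # One-pass sliding-window minimum via a monotonic queue: index c is a swing
--     # low iff its low equals the minimum of the lows over the window [c-n, c+n].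
--     lows = []
--     if n >= 0 and len(candles) > 2 * n:
--         vals = [c["l"] for c in candles]
--         dq = []  # indices with strictly increasing lows; dq[0] = argmin of window
--         for i in range(len(vals)):
--             while dq and vals[dq[-1]] >= vals[i]:
--                 dq.pop()
--             dq.append(i)
--             while dq[0] < i - 2 * n:
--                 dq.pop(0)
--             c = i - n
--             if c >= n and vals[c] == vals[dq[0]]:
--                 lows.append((c, vals[c]))
--     return lows
-- ===== Notes on version B (the rewrite author's own statement) =====
-- stated objective: alternative
-- what changed: replaces A's per-index rescans of the +-n neighbourhood with a single-pass sliding-window minimum kept in a monotonic queue, emitting an index when its low equals the window minimum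
-- outside the precondition, e.g. on _swing_lows_ohlc([{'l': 0}, {'l': 5}, {'x': 1}], 1): A returns [], B raises KeyError; on _swing_lows_ohlc([], -1): A raises IndexError, B returns []
import Mathlib
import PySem

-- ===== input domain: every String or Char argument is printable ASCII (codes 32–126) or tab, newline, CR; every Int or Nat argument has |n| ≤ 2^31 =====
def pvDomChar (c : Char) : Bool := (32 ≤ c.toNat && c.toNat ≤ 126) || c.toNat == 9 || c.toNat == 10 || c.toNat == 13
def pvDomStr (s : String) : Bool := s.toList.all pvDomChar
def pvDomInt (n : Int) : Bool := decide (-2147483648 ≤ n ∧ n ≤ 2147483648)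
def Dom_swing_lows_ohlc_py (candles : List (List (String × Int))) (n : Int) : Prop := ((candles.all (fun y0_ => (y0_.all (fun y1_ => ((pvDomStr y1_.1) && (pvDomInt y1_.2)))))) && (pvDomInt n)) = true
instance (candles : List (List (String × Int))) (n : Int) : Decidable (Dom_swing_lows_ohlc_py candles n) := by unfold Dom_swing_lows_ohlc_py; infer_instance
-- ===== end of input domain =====

-- B replaces A's per-index ±n window rescans with a one-pass monotonic-queue sliding-window
-- minimum (objective: alternative algorithm, same result).

-- ===== PORT A =====
-- candles[k]["l"]: list index then first-match dict lookup; defaults are never used inside Pre_.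
def pvLow (candles : List (List (String × Int))) (k : Int) : Int :=
  ((PySem.Dict.mk ((PySem.List.pyGet? candles k).getD [])).get? "l").getD 0

def swing_lows_ohlc_py (candles : List (List (String × Int))) (n : Int) : List (Int × Int) :=
  (PySem.List.pyRange n ((candles.length : Int) - n) 1).foldl
    (fun lows i =>
      let lo := pvLow candles i
      if ((PySem.List.pyRange 1 (n + 1) 1).all fun j => decide (lo ≤ pvLow candles (i - j)))
          && ((PySem.List.pyRange 1 (n + 1) 1).all fun j => decide (lo ≤ pvLow candles (i + j)))
      then lows ++ [(i, lo)] else lows)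
    []

-- ===== PORT B =====
-- vals[k] (indices produced by the loop are always in range; the default is never used inside Pre_)
def pvVal (vals : List Int) (k : Int) : Int := (PySem.List.pyGet? vals k).getD 0

-- Source B's back-popping while loop ('while dq and vals[dq[-1]] >= vals[i]: dq.pop()'),
-- run on the reversed queue (Python's dq[-1]/dq.pop() end)
def pvPopWhile (vals : List Int) (v : Int) : List Int → List Int
  | [] => []
  | d :: rest => if v ≤ pvVal vals d then pvPopWhile vals v rest else d :: rest

-- Source B's front-evicting while loop ('while dq[0] < i - 2*n: dq.pop(0)'); dq is never
-- empty there in Source B (i was just appended), so the [] case is unreachable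
def pvDropFront (bound : Int) : List Int → List Int
  | [] => []
  | d :: rest => if d < bound then pvDropFront bound rest else d :: rest

-- one iteration of Source B's for-loop; state = (dq, lows)
def pvStep (vals : List Int) (n : Int) (st : List Int × List (Int × Int)) (i : Int) :
    List Int × List (Int × Int) :=
  let dq1 := (pvPopWhile vals (pvVal vals i) st.1.reverse).reverse ++ [i]
  let dq2 := pvDropFront (i - 2 * n) dq1
  let c := i - n
  if n ≤ c ∧ pvVal vals c = pvVal vals (dq2.headD 0)
  then (dq2, st.2 ++ [(c, pvVal vals c)])
  else (dq2, st.2)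

def swing_lows_ohlc_py_alt (candles : List (List (String × Int))) (n : Int) : List (Int × Int) :=
  if 0 ≤ n ∧ 2 * n < (candles.length : Int) then
    let vals := candles.map fun c => ((PySem.Dict.mk c).get? "l").getD 0
    ((PySem.List.pyRange 0 ((vals.length : Nat) : Int) 1).foldl (pvStep vals n) ([], [])).2
  else []

-- ===== PRECONDITION & SPEC =====
-- Pre_ excludes exactly the inputs where one of the programs raises: n < 0, on which A
-- always raises IndexError (its index range necessarily reaches the list length) while
-- B returns an empty result; and, when the loop range is nonempty, candle lists with a candle
-- without key "l", on which B's upfront low-extraction raises KeyError — A also raises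
-- KeyError on these unless all()'s short-circuit skips the defective candle (see cites).
def Pre_swing_lows_ohlc_py (candles : List (List (String × Int))) (n : Int) : Prop :=
  0 ≤ n ∧ ((candles.length : Int) ≤ 2 * n ∨
    ∀ c ∈ candles, ((PySem.Dict.mk c).get? "l").isSome = true)
instance (candles : List (List (String × Int))) (n : Int) :
    Decidable (Pre_swing_lows_ohlc_py candles n) := by
  unfold Pre_swing_lows_ohlc_py; infer_instance

def pvWitness_swing_lows_ohlc_py : (List (List (String × Int))) × Int :=
  ([[("l", 1)], [("l", 0)], [("l", 2)]], 1)

def Spec_swing_lows_ohlc_py (candles : List (List (String × Int))) (n : Int)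
    (out : List (Int × Int)) : Prop := out = swing_lows_ohlc_py_alt candles n
instance (candles : List (List (String × Int))) (n : Int) (out : List (Int × Int)) :
    Decidable (Spec_swing_lows_ohlc_py candles n out) := by
  unfold Spec_swing_lows_ohlc_py; infer_instance

-- ===== CLAIM (what is proved, stated in full; the proofs are below) =====
def Claim_equal_swing_lows_ohlc_py : Prop :=
  ∀ (candles : List (List (String × Int))) (n : Int), Dom_swing_lows_ohlc_py candles n →
    Pre_swing_lows_ohlc_py candles n →
    Spec_swing_lows_ohlc_py candles n (swing_lows_ohlc_py candles n)

-- ===== LEMMAS AND PROOFS =====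

-- the common specification: c is kept iff its low is ≤ every low in the ±n window
def pvIsMin (vals : List Int) (n c : Int) : Bool :=
  (PySem.List.pyRange (c - n) (c + n + 1) 1).all fun k => decide (pvVal vals c ≤ pvVal vals k)

def pvSpecList (vals : List Int) (n : Int) : List (Int × Int) :=
  ((PySem.List.pyRange n ((vals.length : Int) - n) 1).filter (pvIsMin vals n)).map
    fun c => (c, pvVal vals c)

theorem pvPopWhile_sublist (vals : List Int) (v : Int) (l : List Int) :
    (pvPopWhile vals v l).Sublist l := by
  induction l with
  | nil => simp [pvPopWhile]
  | cons d rest ih =>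
    simp only [pvPopWhile]
    split
    · exact ih.trans (List.sublist_cons_self d rest)
    · exact List.Sublist.refl _

theorem pvPopWhile_mem_or (vals : List Int) (v : Int) (l : List Int) :
    ∀ d ∈ l, d ∈ pvPopWhile vals v l ∨ v ≤ pvVal vals d := by
  induction l with
  | nil => simp
  | cons e rest ih =>
    intro d hd
    simp only [pvPopWhile]
    rcases List.mem_cons.mp hd with h | h
    · subst h
      split
      · right; assumption
      · left; exact List.mem_cons_self
    · split
      · exact ih d h
      · left; exact List.mem_cons_of_mem _ h

theorem pvPopWhile_lt (vals : List Int) (v : Int) (l : List Int)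
    (hl : l.Pairwise (fun a b => pvVal vals b < pvVal vals a)) :
    ∀ d ∈ pvPopWhile vals v l, pvVal vals d < v := by
  induction l with
  | nil => simp [pvPopWhile]
  | cons e rest ih =>
    intro d hd
    simp only [pvPopWhile] at hd
    rcases List.pairwise_cons.mp hl with ⟨he, hrest⟩
    split at hd
    · exact ih hrest d hd
    · rcases List.mem_cons.mp hd with h | h
      · subst h; omega
      · exact lt_trans (he d h) (by omega)

theorem pvDropFront_sublist (b : Int) (l : List Int) :
    (pvDropFront b l).Sublist l := by
  induction l with
  | nil => simp [pvDropFront]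
  | cons d rest ih =>
    simp only [pvDropFront]
    split
    · exact ih.trans (List.sublist_cons_self d rest)
    · exact List.Sublist.refl _

theorem pvDropFront_mem (b : Int) (l : List Int)
    (hl : l.Pairwise (fun a b : Int => a < b)) :
    ∀ d, d ∈ pvDropFront b l ↔ d ∈ l ∧ b ≤ d := by
  induction l with
  | nil => simp [pvDropFront]
  | cons e rest ih =>
    intro d
    rcases List.pairwise_cons.mp hl with ⟨he, hrest⟩
    simp only [pvDropFront]
    split
    · rw [ih hrest d]
      constructor
      · rintro ⟨h1, h2⟩; exact ⟨List.mem_cons_of_mem _ h1, h2⟩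
      · rintro ⟨h1, h2⟩
        rcases List.mem_cons.mp h1 with h | h
        · omega
        · exact ⟨h, h2⟩
    · constructor
      · intro h
        rcases List.mem_cons.mp h with h | h
        · subst h; exact ⟨List.mem_cons_self, by omega⟩
        · exact ⟨List.mem_cons_of_mem _ h, le_of_lt (lt_of_le_of_lt (by omega) (he d h))⟩
      · exact fun h => h.1

def pvInvQ (vals : List Int) (n m : Int) (dq : List Int) : Prop :=
  dq.Pairwise (fun a b => a < b ∧ pvVal vals a < pvVal vals b)
  ∧ (∀ d ∈ dq, m - 2 * n ≤ d ∧ 0 ≤ d ∧ d ≤ m)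
  ∧ (∀ k : Int, m - 2 * n ≤ k → 0 ≤ k → k ≤ m →
      ∃ d ∈ dq, k ≤ d ∧ pvVal vals d ≤ pvVal vals k)

theorem pvHeadD_min (vals : List Int) (dq : List Int)
    (h : dq.Pairwise (fun a b => a < b ∧ pvVal vals a < pvVal vals b)) :
    ∀ d ∈ dq, pvVal vals (dq.headD 0) ≤ pvVal vals d := by
  cases dq with
  | nil => simp
  | cons f rest =>
    intro d hd
    rcases List.mem_cons.mp hd with h' | h'
    · subst h'; simp
    · exact le_of_lt ((List.pairwise_cons.mp h).1 d h').2

theorem pvStep_inv (vals : List Int) (n i : Int) (dq : List Int) (res : List (Int × Int))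
    (hn : 0 ≤ n) (hi : 0 ≤ i) (h : pvInvQ vals n (i - 1) dq) :
    pvInvQ vals n i (pvStep vals n (dq, res) i).1 ∧
    (pvStep vals n (dq, res) i).2 =
      res ++ (if n ≤ i - n ∧ pvIsMin vals n (i - n) = true
              then [(i - n, pvVal vals (i - n))] else []) := by
  obtain ⟨hpw, hbnd, hdom⟩ := h
  set v := pvVal vals i with hv
  set S := (pvPopWhile vals v dq.reverse).reverse with hS
  set dq1 := S ++ [i] with hdq1
  set dq2 := pvDropFront (i - 2 * n) dq1 with hdq2
  -- S is a sublist of dq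
  have hSsub : S.Sublist dq := by
    have := (pvPopWhile_sublist vals v dq.reverse).reverse
    simpa [hS] using this
  have hSmem : ∀ a ∈ S, a ∈ dq := fun a ha => hSsub.mem ha
  -- values of S are < v
  have hSlt : ∀ a ∈ S, pvVal vals a < v := by
    intro a ha
    have hrev : dq.reverse.Pairwise (fun a b => pvVal vals b < pvVal vals a) := by
      rw [List.pairwise_reverse]
      exact hpw.imp (fun hab => hab.2)
    exact pvPopWhile_lt vals v dq.reverse hrev a (by simpa [hS] using ha)
  -- dq1 pairwise
  have hdq1pw : dq1.Pairwise (fun a b => a < b ∧ pvVal vals a < pvVal vals b) := by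
    rw [hdq1, List.pairwise_append]
    refine ⟨hpw.sublist hSsub, List.pairwise_singleton _ _, ?_⟩
    intro a ha b hb
    rcases List.mem_singleton.mp hb with rfl
    have h1 := hbnd a (hSmem a ha)
    exact ⟨by omega, hSlt a ha⟩
  have hdq1idx : dq1.Pairwise (fun a b : Int => a < b) := hdq1pw.imp (fun hab => hab.1)
  -- membership in dq2
  have hdq2mem : ∀ d, d ∈ dq2 ↔ d ∈ dq1 ∧ i - 2 * n ≤ d :=
    pvDropFront_mem _ _ hdq1idx
  have hidq2 : i ∈ dq2 := (hdq2mem i).mpr ⟨by simp [hdq1], by omega⟩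
  have hdq2pw : dq2.Pairwise (fun a b => a < b ∧ pvVal vals a < pvVal vals b) :=
    hdq1pw.sublist (pvDropFront_sublist _ _)
  have hdq2bnd : ∀ d ∈ dq2, i - 2 * n ≤ d ∧ 0 ≤ d ∧ d ≤ i := by
    intro d hd
    rcases (hdq2mem d).mp hd with ⟨hd1, hlo⟩
    rcases List.mem_append.mp hd1 with hd1 | hd1
    · have := hbnd d (hSmem d hd1); exact ⟨hlo, by omega, by omega⟩
    · have hdi := List.mem_singleton.mp hd1; exact ⟨hlo, by omega, by omega⟩
  have hdq2dom : ∀ k : Int, i - 2 * n ≤ k → 0 ≤ k → k ≤ i →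
      ∃ d ∈ dq2, k ≤ d ∧ pvVal vals d ≤ pvVal vals k := by
    intro k hk0 hk1 hk2
    rcases eq_or_lt_of_le hk2 with rfl | hk2
    · exact ⟨_, hidq2, le_refl _, le_refl _⟩
    · obtain ⟨d, hd, hkd, hvd⟩ := hdom k (by omega) hk1 (by omega)
      rcases pvPopWhile_mem_or vals v dq.reverse d (by simpa using hd) with hmem | hge
      · -- d survived the pop: d ∈ S ⊆ dq1, and d ≥ k ≥ i-2n so d ∈ dq2
        have hdS : d ∈ S := by simpa [hS] using hmem
        exact ⟨d, (hdq2mem d).mpr ⟨List.mem_append.mpr (Or.inl hdS), by omega⟩, hkd, hvd⟩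
      · -- d was popped: i dominates instead
        exact ⟨i, hidq2, by omega, le_trans hge hvd⟩
  have hinv2 : pvInvQ vals n i dq2 := ⟨hdq2pw, hdq2bnd, hdq2dom⟩
  refine ⟨?_, ?_⟩
  · show pvInvQ vals n i (pvStep vals n (dq, res) i).1
    simp only [pvStep]
    split <;> exact hinv2
  · -- the result component
    have htest : (n ≤ i - n ∧ pvVal vals (i - n) = pvVal vals (dq2.headD 0)) ↔
        (n ≤ i - n ∧ pvIsMin vals n (i - n) = true) := by
      constructor
      · rintro ⟨hc, heq⟩
        refine ⟨hc, ?_⟩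
        rw [pvIsMin, List.all_eq_true]
        intro k hk
        rw [PySem.List.mem_pyRange_one] at hk
        rw [decide_eq_true_iff]
        obtain ⟨d, hd, hkd, hvd⟩ := hdq2dom k (by omega) (by omega) (by omega)
        calc pvVal vals (i - n) = pvVal vals (dq2.headD 0) := heq
          _ ≤ pvVal vals d := pvHeadD_min vals dq2 hdq2pw d hd
          _ ≤ pvVal vals k := hvd
      · rintro ⟨hc, hmin⟩
        refine ⟨hc, ?_⟩
        rw [pvIsMin, List.all_eq_true] at hmin
        have hall : ∀ k : Int, i - 2 * n ≤ k → k ≤ i → pvVal vals (i - n) ≤ pvVal vals k := by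
          intro k h1 h2
          have := hmin k (PySem.List.mem_pyRange_one.mpr ⟨by omega, by omega⟩)
          exact decide_eq_true_iff.mp this
        -- the front f is in the window, so val c ≤ val f; and val f ≤ val c since c is in the window
        have hf : dq2.headD 0 ∈ dq2 := by
          cases hq : dq2 with
          | nil => rw [hq] at hidq2; simp at hidq2
          | cons a t => simp
        have hfb := hdq2bnd _ hf
        have h1 : pvVal vals (i - n) ≤ pvVal vals (dq2.headD 0) := hall _ hfb.1 hfb.2.2
        obtain ⟨d, hd, hkd, hvd⟩ := hdq2dom (i - n) (by omega) (by omega) (by omega)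
        have h2 : pvVal vals (dq2.headD 0) ≤ pvVal vals (i - n) :=
          le_trans (pvHeadD_min vals dq2 hdq2pw d hd) hvd
        omega
    simp only [pvStep]
    split
    · next hcond =>
      rw [if_pos (htest.mp hcond)]
    · next hcond =>
      rw [if_neg (fun hc => hcond (htest.mpr hc))]
      simp

theorem pvLoop_inv (vals : List Int) (n : Int) (hn : 0 ≤ n) (m : Nat) :
    pvInvQ vals n ((m : Int) - 1)
        ((PySem.List.pyRange 0 (m : Int) 1).foldl (pvStep vals n) ([], [])).1 ∧
    ((PySem.List.pyRange 0 (m : Int) 1).foldl (pvStep vals n) ([], [])).2 =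
      ((PySem.List.pyRange n ((m : Int) - n) 1).filter (pvIsMin vals n)).map
        (fun c => (c, pvVal vals c)) := by
  induction m with
  | zero =>
    rw [PySem.List.pyRange_one_eq_nil (by omega), PySem.List.pyRange_one_eq_nil (by omega)]
    refine ⟨⟨List.Pairwise.nil, by simp, ?_⟩, by simp⟩
    intro k h1 h2 h3; omega
  | succ m ih =>
    have hsplit : PySem.List.pyRange 0 ((m + 1 : Nat) : Int) 1 =
        PySem.List.pyRange 0 (m : Int) 1 ++ [(m : Int)] := by
      push_cast
      exact PySem.List.pyRange_one_succ_right (by omega)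
    rw [hsplit, List.foldl_append, List.foldl_cons, List.foldl_nil]
    set st := (PySem.List.pyRange 0 (m : Int) 1).foldl (pvStep vals n) ([], []) with hst
    have hstep := pvStep_inv vals n (m : Int) st.1 st.2 hn (by omega) ih.1
    have hmk : (st.1, st.2) = st := rfl
    rw [hmk] at hstep
    constructor
    · have h := hstep.1
      have : ((m + 1 : Nat) : Int) - 1 = (m : Int) := by push_cast; ring
      rw [this]
      exact h
    · rw [hstep.2, ih.2]
      by_cases hc : n ≤ (m : Int) - n
      · rw [show ((m + 1 : Nat) : Int) - n = ((m : Int) - n) + 1 by push_cast; ring,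
            PySem.List.pyRange_one_succ_right hc, List.filter_append, List.map_append]
        by_cases hmin : pvIsMin vals n ((m : Int) - n) = true
        · simp [hmin, hc]
        · simp [hmin, hc]
      · rw [PySem.List.pyRange_one_eq_nil (a := n) (by omega),
            PySem.List.pyRange_one_eq_nil (a := n) (by push_cast; omega)]
        simp [hc]

theorem pvLow_eq (candles : List (List (String × Int))) (k : Int)
    (h0 : 0 ≤ k) (h1 : k < (candles.length : Int)) :
    pvLow candles k =
      pvVal (candles.map fun c => ((PySem.Dict.mk c).get? "l").getD 0) k := by
  have hk : k.toNat < candles.length := by omega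
  rw [pvLow, pvVal, PySem.List.pyGet?_eq_some_getElem candles h0 h1,
      PySem.List.pyGet?_eq_some_getElem (candles.map _) h0 (by simpa using h1)]
  simp

theorem B_eq (candles : List (List (String × Int))) (n : Int) (hn : 0 ≤ n) :
    swing_lows_ohlc_py_alt candles n =
      pvSpecList (candles.map fun c => ((PySem.Dict.mk c).get? "l").getD 0) n := by
  rw [swing_lows_ohlc_py_alt, pvSpecList]
  simp only [List.length_map]
  by_cases hg : 2 * n < (candles.length : Int)
  · rw [if_pos ⟨hn, hg⟩]
    exact (pvLoop_inv _ n hn candles.length).2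
  · rw [if_neg (by tauto), PySem.List.pyRange_one_eq_nil (by omega)]
    simp

theorem A_eq (candles : List (List (String × Int))) (n : Int) (hn : 0 ≤ n) :
    swing_lows_ohlc_py candles n =
      pvSpecList (candles.map fun c => ((PySem.Dict.mk c).get? "l").getD 0) n := by
  set vals := candles.map fun c => ((PySem.Dict.mk c).get? "l").getD 0 with hvals
  rw [swing_lows_ohlc_py, pvSpecList,
      PySem.List.foldl_append_if
        (p := fun i => ((PySem.List.pyRange 1 (n + 1) 1).all fun j =>
            decide (pvLow candles i ≤ pvLow candles (i - j)))
          && ((PySem.List.pyRange 1 (n + 1) 1).all fun j =>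
            decide (pvLow candles i ≤ pvLow candles (i + j))))
        (f := fun i => (i, pvLow candles i))]
  rw [List.nil_append, show ((vals.length : Nat) : Int) = (candles.length : Int) by
    simp [hvals]]
  -- pointwise: on range members the tests agree and the pairs agree
  have hmemval : ∀ i ∈ PySem.List.pyRange n ((candles.length : Int) - n) 1,
      ∀ k : Int, i - n ≤ k → k ≤ i + n → pvLow candles k = pvVal vals k := by
    intro i hi k hk1 hk2
    rw [PySem.List.mem_pyRange_one] at hi
    exact pvLow_eq candles k (by omega) (by omega)
  have hfilter : (PySem.List.pyRange n ((candles.length : Int) - n) 1).filter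
      (fun i => ((PySem.List.pyRange 1 (n + 1) 1).all fun j =>
            decide (pvLow candles i ≤ pvLow candles (i - j)))
          && ((PySem.List.pyRange 1 (n + 1) 1).all fun j =>
            decide (pvLow candles i ≤ pvLow candles (i + j)))) =
      (PySem.List.pyRange n ((candles.length : Int) - n) 1).filter (pvIsMin vals n) := by
    apply List.filter_congr
    intro i hi
    have hv := hmemval i hi
    rw [Bool.eq_iff_iff, Bool.and_eq_true, List.all_eq_true, List.all_eq_true, pvIsMin, List.all_eq_true]
    simp only [PySem.List.mem_pyRange_one, decide_eq_true_iff]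
    constructor
    · rintro ⟨hl, hr⟩ k ⟨hk1, hk2⟩
      rcases lt_trichotomy k i with hki | hki | hki
      · have := hl (i - k) ⟨by omega, by omega⟩
        rw [hv i (by omega) (by omega), hv (i - (i - k)) (by omega) (by omega)] at this
        simpa using this
      · subst hki
        exact le_refl _
      · have := hr (k - i) ⟨by omega, by omega⟩
        rw [hv i (by omega) (by omega), hv (i + (k - i)) (by omega) (by omega)] at this
        simpa using this
    · intro hall
      constructor
      · intro j ⟨hj1, hj2⟩
        have := hall (i - j) ⟨by omega, by omega⟩
        rw [hv i (by omega) (by omega), hv (i - j) (by omega) (by omega)]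
        exact this
      · intro j ⟨hj1, hj2⟩
        have := hall (i + j) ⟨by omega, by omega⟩
        rw [hv i (by omega) (by omega), hv (i + j) (by omega) (by omega)]
        exact this
  rw [hfilter]
  apply List.map_congr_left
  intro i hi
  have hi' := List.mem_filter.mp hi
  rw [hmemval i hi'.1 i (by omega) (by omega)]

-- ===== VERDICT (by name: the statement is the Claim_ definition above) =====
theorem swing_lows_ohlc_py_spec : Claim_equal_swing_lows_ohlc_py := by
  intro candles n _ hpre
  unfold Spec_swing_lows_ohlc_py
  rw [A_eq candles n hpre.1, B_eq candles n hpre.1]
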